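-- pv_equiv track=rewrite | github.com/ChrisCodesNow/wb | 01_basics/04_bits/03_bin_gap.py | largest_gap_ones
-- ===== SOURCE A (Python) =====
-- def largest_gap_ones(bin_str):
--     gap = 0
--     prev_one = None
--
--     for i,bit in enumerate(bin_str):
--         if bit == '1':
--             if prev_one == None:
--                 prev_one = i
--             else:
--                 gap = max(gap, i - prev_one)
--                 prev_one = i
--
--     return gap
-- ===== SOURCE B (Python) =====
-- def largest_gap_ones(bin_str):
--     ones = [i for i, bit in enumerate(bin_str) if bit == '1']
--     return max((b - a for a, b in zip(ones, ones[1:])), default=0)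
-- ===== Notes on version B (the rewrite author's own statement) =====
-- stated objective: idiomatic
-- what changed: Replaced the single-pass running-state scan (gap/prev_one accumulator) by a collect-then-reduce decomposition: gather the indices of all '1' bits, then take the max of consecutive differences via zip with default 0.
import Mathlib
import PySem

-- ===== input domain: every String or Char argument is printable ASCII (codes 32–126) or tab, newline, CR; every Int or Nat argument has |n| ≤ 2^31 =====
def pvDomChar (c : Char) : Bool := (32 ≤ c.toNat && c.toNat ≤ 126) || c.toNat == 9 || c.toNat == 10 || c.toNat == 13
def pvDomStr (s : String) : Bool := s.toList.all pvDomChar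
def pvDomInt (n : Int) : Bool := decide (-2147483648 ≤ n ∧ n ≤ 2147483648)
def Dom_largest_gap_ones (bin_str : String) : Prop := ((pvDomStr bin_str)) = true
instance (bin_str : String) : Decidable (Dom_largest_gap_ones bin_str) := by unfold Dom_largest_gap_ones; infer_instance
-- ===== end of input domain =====

-- B replaces A's running-state scan by a collect-the-'1'-indices-then-max-of-consecutive-diffs decomposition (same O(n) cost).

-- ===== PORT A =====
-- single pass with state (gap, prev_one); prev_one : Option Int mirrors Python's None
def largest_gap_ones (bin_str : String) : Int :=
  ((PySem.List.enumerate bin_str.toList 0).foldl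
    (fun (s : Int × Option Int) (p : Int × Char) =>
      if p.2 = '1' then
        match s.2 with
        | none => (s.1, some p.1)
        | some prev => (max s.1 (p.1 - prev), some p.1)
      else s) (0, none)).1

-- ===== PORT B =====
-- ones = [i for i, bit in enumerate(bin_str) if bit == '1']
-- max((b - a for a, b in zip(ones, ones[1:])), default=0)
def largest_gap_ones_alt (bin_str : String) : Int :=
  let ones : List Int :=
    ((PySem.List.enumerate bin_str.toList 0).filter (fun p => p.2 = '1')).map (·.1)
  let diffs : List Int :=
    (ones.zip (PySem.List.slice ones (some 1) none)).map (fun p => p.2 - p.1)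
  match diffs with
  | [] => 0
  | d :: ds => ds.foldl max d

-- ===== PRECONDITION & SPEC =====
def Spec_largest_gap_ones (bin_str : String) (out : Int) : Prop := out = largest_gap_ones_alt bin_str
instance (bin_str : String) (out : Int) : Decidable (Spec_largest_gap_ones bin_str out) := by unfold Spec_largest_gap_ones; infer_instance

-- ===== CLAIM (what is proved, stated in full; the proofs are below) =====
def Claim_equal_largest_gap_ones : Prop := ∀ (bin_str : String), Dom_largest_gap_ones bin_str → Spec_largest_gap_ones bin_str (largest_gap_ones bin_str)

-- ===== LEMMAS AND PROOFS =====

/-- indices (starting at i) of the '1' characters of cs -/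
def onesIdx : List Char → Int → List Int
  | [], _ => []
  | c :: cs, i => if c = '1' then i :: onesIdx cs (i + 1) else onesIdx cs (i + 1)

/-- A's loop, replayed over just the ones-indices -/
def auxA : Int → Option Int → List Int → Int
  | g, _, [] => g
  | g, none, x :: xs => auxA g (some x) xs
  | g, some p, x :: xs => auxA (max g (x - p)) (some x) xs

/-- differences of consecutive elements -/
def consecDiffs : List Int → List Int
  | [] => []
  | [_] => []
  | x :: y :: r => (y - x) :: consecDiffs (y :: r)

theorem foldA_eq_auxA (cs : List Char) (i : Int) (s : Int × Option Int) :
    ((PySem.List.enumerate cs i).foldl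
      (fun (s : Int × Option Int) (p : Int × Char) =>
        if p.2 = '1' then
          match s.2 with
          | none => (s.1, some p.1)
          | some prev => (max s.1 (p.1 - prev), some p.1)
        else s) s).1 = auxA s.1 s.2 (onesIdx cs i) := by
  induction cs generalizing i s with
  | nil => simp [PySem.List.enumerate_nil, onesIdx, auxA]
  | cons c cs ih =>
    rw [PySem.List.enumerate_cons]
    simp only [List.foldl_cons, onesIdx]
    by_cases hc : c = '1'
    · cases hp : s.2 with
      | none => simp [hc, ih, auxA]
      | some prev => simp [hc, ih, auxA]
    · simp [hc, ih]

theorem filter_map_eq_onesIdx (cs : List Char) (i : Int) :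
    ((PySem.List.enumerate cs i).filter (fun p => p.2 = '1')).map (·.1) = onesIdx cs i := by
  induction cs generalizing i with
  | nil => simp [PySem.List.enumerate_nil, onesIdx]
  | cons c cs ih =>
    rw [PySem.List.enumerate_cons]
    by_cases hc : c = '1' <;> simp [onesIdx, hc, ih]

theorem zip_tail_eq_consecDiffs (xs : List Int) :
    (xs.zip xs.tail).map (fun p => p.2 - p.1) = consecDiffs xs := by
  induction xs with
  | nil => simp [consecDiffs]
  | cons x xs ih =>
    cases xs with
    | nil => simp [consecDiffs]
    | cons y r =>
      simp only [List.tail_cons, List.zip_cons_cons, List.map_cons, consecDiffs]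
      simpa using ih

theorem auxA_some (xs : List Int) (g p : Int) :
    auxA g (some p) xs = (consecDiffs (p :: xs)).foldl max g := by
  induction xs generalizing g p with
  | nil => simp [auxA, consecDiffs]
  | cons x xs ih => simp [auxA, consecDiffs, ih]

theorem onesIdx_ge (cs : List Char) (i : Int) : ∀ z ∈ onesIdx cs i, i ≤ z := by
  induction cs generalizing i with
  | nil => simp [onesIdx]
  | cons c cs ih =>
    intro z hz
    simp only [onesIdx] at hz
    split at hz
    · rcases List.mem_cons.mp hz with h | h
      · omega
      · have := ih (i + 1) z h; omega
    · have := ih (i + 1) z hz; omega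

theorem onesIdx_pairwise (cs : List Char) (i : Int) :
    (onesIdx cs i).Pairwise (· < ·) := by
  induction cs generalizing i with
  | nil => simp [onesIdx]
  | cons c cs ih =>
    simp only [onesIdx]
    split
    · exact List.Pairwise.cons (fun z hz => by have := onesIdx_ge cs (i + 1) z hz; omega) (ih (i + 1))
    · exact ih (i + 1)

theorem auxA_eq_maxDefault (o : List Int) (ho : o.Pairwise (· < ·)) :
    auxA 0 none o =
      (match consecDiffs o with
       | [] => (0 : Int)
       | d :: ds => ds.foldl max d) := by
  cases o with
  | nil => simp [auxA, consecDiffs]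
  | cons x xs =>
    cases xs with
    | nil => simp [auxA, consecDiffs]
    | cons y r =>
      have hxy : x < y := (List.pairwise_cons.mp ho).1 y (by simp)
      show auxA 0 (some x) (y :: r) = _
      rw [auxA_some]
      simp only [consecDiffs, List.foldl_cons]
      have : max (0 : Int) (y - x) = y - x := by omega
      rw [this]

-- ===== VERDICT (by name: the statement is the Claim_ definition above) =====
theorem largest_gap_ones_spec : Claim_equal_largest_gap_ones := by
  intro s _
  unfold Spec_largest_gap_ones largest_gap_ones largest_gap_ones_alt
  rw [foldA_eq_auxA]
  simp only [PySem.List.slice_from_one, filter_map_eq_onesIdx, zip_tail_eq_consecDiffs]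
  exact auxA_eq_maxDefault _ (onesIdx_pairwise _ _)
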